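-- pv_equiv track=rewrite | github.com/gabbychoi43/PythonExercise | LineTest2.py | solution
-- ===== SOURCE A (Python) =====
-- import itertools as it
--
-- class Cheat():
--
--     def __init__(self, answer_sheet):
--         self.answer_sheet = answer_sheet
--
--     def CheatValue(self, sheet1, sheet2):
--         cheatList = []
--         for i in range(len(self.answer_sheet)):
--             if self.answer_sheet[i] != sheet1[i] and sheet1[i] == sheet2[i]:
--                 cheatList.append(1)
--             else:
--                 cheatList.append(0)
--         return cheatList
--
-- def solution(answer_sheet, sheets):
--     x = it.combinations(range(len(sheets)), 2)
--     CheatV = 0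
--     cheat = Cheat(answer_sheet)
--     cheatL = []
--     for i in x:
--         same = 0
--         l = cheat.CheatValue(sheets[i[0]], sheets[i[1]])
--         for j in l:
--             same += j
--
--         l.append(0)
--         n = len(l)
--         cnt = 0
--         cntlist = []
--         for j in range(n):
--             if l[j] == 1:
--                 if cnt == 0:
--                     cnt += 1
--                 if l[j + 1] == 1:
--                     cnt += 1
--                 else:
--                     cntlist.append(cnt)
--                     cnt = 0
--
--         cntlist.append(0)
--
--         cheatL.append(same + max(cntlist) ** 2)
--     answer = max(cheatL)
--     return answer
-- ===== SOURCE B (Python) =====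
-- def solution(answer_sheet, sheets):
--     n = len(answer_sheet)
--     # per sheet, once: dict position -> answer written there, only where it differs from the key
--     wrong = [{i: s[i] for i in range(n) if s[i] != answer_sheet[i]} for s in sheets]
--     scores = []
--     for j in range(len(sheets)):
--         for k in range(j + 1, len(sheets)):
--             d1, d2 = wrong[j], wrong[k]
--             pos = [i for i, v in d1.items() if d2.get(i) == v]
--             best_run = cur = 0
--             prev = None
--             for p in pos:
--                 cur = cur + 1 if prev == p - 1 else 1
--                 prev = p
--                 if cur > best_run:
--                     best_run = cur
--             scores.append(len(pos) + best_run * best_run)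
--     return max(scores)
-- ===== Notes on version B (the rewrite author's own statement) =====
-- stated objective: alternative
-- what changed: B precomputes once per sheet a dict of wrong-answer positions (position -> value written), scores each pair by intersecting those dicts (positions present in both with equal values) and measuring the longest run of consecutive position indices, instead of A's per-pair three-pass pipeline that rebuilds a 0/1 cheat list, sums it, and run-scans it with a sentinel and lookahead.
import Mathlib
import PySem

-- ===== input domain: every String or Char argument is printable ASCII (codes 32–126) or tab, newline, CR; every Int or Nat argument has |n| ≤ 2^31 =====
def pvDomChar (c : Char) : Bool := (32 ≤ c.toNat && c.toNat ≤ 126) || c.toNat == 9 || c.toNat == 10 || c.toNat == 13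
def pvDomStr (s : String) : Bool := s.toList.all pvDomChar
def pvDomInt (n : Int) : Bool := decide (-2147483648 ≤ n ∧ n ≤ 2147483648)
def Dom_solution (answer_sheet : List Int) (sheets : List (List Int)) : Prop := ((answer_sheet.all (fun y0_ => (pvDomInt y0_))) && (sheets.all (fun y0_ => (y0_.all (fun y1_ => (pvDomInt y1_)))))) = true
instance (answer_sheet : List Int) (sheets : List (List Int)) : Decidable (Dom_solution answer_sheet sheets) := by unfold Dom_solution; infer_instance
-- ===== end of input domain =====

-- B precomputes per sheet a dict of wrong-answer positions and scores each pair by dict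
-- intersection plus a longest-consecutive-index run, instead of A's per-pair 0/1 list with
-- sum and sentinel run-scan (alternative decomposition, same cost).


-- ===== PORT A =====
-- Cheat.CheatValue: builds the 0/1 list position by position
def cheatValue (answer_sheet sheet1 sheet2 : List Int) : List Int :=
  (PySem.List.pyRange 0 (answer_sheet.length : Int) 1).foldl (fun cheatList i =>
    if PySem.List.pyGetD answer_sheet i 0 ≠ PySem.List.pyGetD sheet1 i 0 ∧
       PySem.List.pyGetD sheet1 i 0 = PySem.List.pyGetD sheet2 i 0 then
      cheatList ++ [1]
    else
      cheatList ++ [0]) []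

def solution (answer_sheet : List Int) (sheets : List (List Int)) : Int :=
  let x := PySem.List.combinations (PySem.List.pyRange 0 (sheets.length : Int) 1) 2
  let cheatL := x.foldl (fun cheatL i =>
    let l := cheatValue answer_sheet
      (PySem.List.pyGetD sheets (PySem.List.pyGetD i 0 0) [])
      (PySem.List.pyGetD sheets (PySem.List.pyGetD i 1 0) [])
    let same := l.foldl (fun same j => same + j) 0
    let l := l ++ [0]
    let n := l.length
    let scan := (PySem.List.pyRange 0 (n : Int) 1).foldl (fun (st : Int × List Int) j =>
      if PySem.List.pyGetD l j 0 = 1 then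
        let cnt := if st.1 = 0 then st.1 + 1 else st.1
        if PySem.List.pyGetD l (j + 1) 0 = 1 then (cnt + 1, st.2)
        else (0, st.2 ++ [cnt])
      else st) (0, ([] : List Int))
    let cntlist := scan.2 ++ [0]
    cheatL ++ [same + ((PySem.List.max? cntlist (fun y => y)).getD 0) ^ 2]) []
  (PySem.List.max? cheatL (fun y => y)).getD 0

-- ===== PORT B =====
def solution_alt (answer_sheet : List Int) (sheets : List (List Int)) : Int :=
  let n := (answer_sheet.length : Int)
  let wrong := sheets.map (fun s =>
    (PySem.List.pyRange 0 n 1).foldl (fun d i =>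
      if PySem.List.pyGetD s i 0 ≠ PySem.List.pyGetD answer_sheet i 0
      then d.insert i (PySem.List.pyGetD s i 0) else d) (PySem.Dict.empty : PySem.Dict Int Int))
  let scores := (PySem.List.pyRange 0 (sheets.length : Int) 1).foldl (fun scores j =>
    (PySem.List.pyRange (j + 1) (sheets.length : Int) 1).foldl (fun scores k =>
      let d1 := PySem.List.pyGetD wrong j PySem.Dict.empty
      let d2 := PySem.List.pyGetD wrong k PySem.Dict.empty
      let pos := d1.items.foldl (fun acc p =>
        if PySem.Dict.get? d2 p.1 == some p.2 then acc ++ [p.1] else acc) []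
      let st := pos.foldl (fun (st : Int × Int × Option Int) p =>
        let cur := if st.2.2 == some (p - 1) then st.2.1 + 1 else 1
        ((if cur > st.1 then cur else st.1), cur, some p)) (0, 0, none)
      scores ++ [(pos.length : Int) + st.1 * st.1]) scores) []
  (PySem.List.max? scores (fun y => y)).getD 0

-- ===== PRECONDITION & SPEC =====
-- Pre_ excludes exactly the inputs where Python A raises: fewer than two sheets
-- (ValueError from max([])) or a sheet shorter than the answer sheet (IndexError).
def Pre_solution (answer_sheet : List Int) (sheets : List (List Int)) : Prop :=
  2 ≤ sheets.length ∧ ∀ s ∈ sheets, answer_sheet.length ≤ s.length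
instance (answer_sheet : List Int) (sheets : List (List Int)) : Decidable (Pre_solution answer_sheet sheets) := by unfold Pre_solution; infer_instance

def pvWitness_solution : List Int × List (List Int) := ([1, 2, 3], [[1, 2, 3], [2, 2, 3], [2, 3, 3]])

def Spec_solution (answer_sheet : List Int) (sheets : List (List Int)) (out : Int) : Prop := out = solution_alt answer_sheet sheets
instance (answer_sheet : List Int) (sheets : List (List Int)) (out : Int) : Decidable (Spec_solution answer_sheet sheets out) := by unfold Spec_solution; infer_instance

-- ===== CLAIM (what is proved, stated in full; the proofs are below) =====
def Claim_equal_solution : Prop := ∀ (answer_sheet : List Int) (sheets : List (List Int)), Dom_solution answer_sheet sheets → Pre_solution answer_sheet sheets → Spec_solution answer_sheet sheets (solution answer_sheet sheets)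

-- ===== LEMMAS AND PROOFS =====

-- the per-position cheat condition both programs test (as a Bool, via PySem.List.pyGetD)
def cheatB (answer_sheet s1 s2 : List Int) (i : Int) : Bool :=
  decide (PySem.List.pyGetD answer_sheet i 0 ≠ PySem.List.pyGetD s1 i 0) &&
  decide (PySem.List.pyGetD s1 i 0 = PySem.List.pyGetD s2 i 0)

-- structural form of an index loop that reads l[j] and l[j+1]
def lookWalk {σ : Type} (f : σ → Int → Int → σ) : List Int → σ → σ
  | [], st => st
  | x :: xs, st => lookWalk f xs (f st x (xs.headD 0))

-- the body of A's sentinel run-scan, as a function of the two values read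
def scanF (st : Int × List Int) (a b : Int) : Int × List Int :=
  if a = 1 then
    let cnt := if st.1 = 0 then st.1 + 1 else st.1
    if b = 1 then (cnt + 1, st.2) else (0, st.2 ++ [cnt])
  else st

-- the longest-run-of-1s value both per-pair computations amount to
def streamRun : List Int → Int → Int → Int
  | [], r, _ => r
  | x :: xs, r, c => if x = 1 then streamRun xs (if c + 1 > r then c + 1 else r) (c + 1) else streamRun xs r 0

-- the indices (from k) of the 1-entries of a 0/1 list
def posIdx : List Int → Int → List Int
  | [], _ => []
  | b :: bs, k => if b = 1 then k :: posIdx bs (k + 1) else posIdx bs (k + 1)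

-- the body of B's run loop over the position list: state (best_run, cur, prev)
def runStep (st : Int × Int × Option Int) (p : Int) : Int × Int × Option Int :=
  let cur := if st.2.2 == some (p - 1) then st.2.1 + 1 else 1
  ((if cur > st.1 then cur else st.1), cur, some p)

def maxA (L : List Int) : Int := L.foldl max 0

def pairsBy {α β : Type} (F : α → α → β) : List α → List β
  | [] => []
  | x :: t => t.map (F x) ++ pairsBy F t

-- A's per-pair score (the body of A's outer loop)
def pairScoreA (answer_sheet s1 s2 : List Int) : Int :=
  let l := cheatValue answer_sheet s1 s2
  let same := l.foldl (fun same j => same + j) 0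
  let l := l ++ [0]
  let n := l.length
  let scan := (PySem.List.pyRange 0 (n : Int) 1).foldl (fun (st : Int × List Int) j =>
    if PySem.List.pyGetD l j 0 = 1 then
      let cnt := if st.1 = 0 then st.1 + 1 else st.1
      if PySem.List.pyGetD l (j + 1) 0 = 1 then (cnt + 1, st.2)
      else (0, st.2 ++ [cnt])
    else st) (0, ([] : List Int))
  let cntlist := scan.2 ++ [0]
  same + ((PySem.List.max? cntlist (fun y => y)).getD 0) ^ 2

-- B's wrong-answer dict for one sheet
def wrongDict (answer_sheet s : List Int) : PySem.Dict Int Int :=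
  (PySem.List.pyRange 0 (answer_sheet.length : Int) 1).foldl (fun d i =>
    if PySem.List.pyGetD s i 0 ≠ PySem.List.pyGetD answer_sheet i 0
    then d.insert i (PySem.List.pyGetD s i 0) else d) (PySem.Dict.empty : PySem.Dict Int Int)

-- B's per-pair score from the two dicts
def posOf (d1 d2 : PySem.Dict Int Int) : List Int :=
  d1.items.foldl (fun acc p =>
    if PySem.Dict.get? d2 p.1 == some p.2 then acc ++ [p.1] else acc) []

def pairScoreB (d1 d2 : PySem.Dict Int Int) : Int :=
  ((posOf d1 d2).length : Int)
  + ((posOf d1 d2).foldl runStep (0, 0, none)).1 * ((posOf d1 d2).foldl runStep (0, 0, none)).1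

theorem headD_drop {α : Type} (L : List α) : ∀ (m : Nat) (d : α), (L.drop m).headD d = L.getD m d := by
  induction L with
  | nil => intro m d; cases m <;> rfl
  | cons x xs ih => intro m d; cases m with
    | zero => rfl
    | succ m => exact ih m d

theorem foldl_lookahead {σ : Type} (f : σ → Int → Int → σ) (L : List Int) :
    ∀ (k : Nat) (st : σ),
      (PySem.List.pyRange (k : Int) (L.length : Int) 1).foldl
        (fun st j => f st (PySem.List.pyGetD L j 0) (PySem.List.pyGetD L (j + 1) 0)) st
      = lookWalk f (L.drop k) st := by
  have H : ∀ (n k : Nat) (st : σ), L.length - k ≤ n →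
      (PySem.List.pyRange (k : Int) (L.length : Int) 1).foldl
        (fun st j => f st (PySem.List.pyGetD L j 0) (PySem.List.pyGetD L (j + 1) 0)) st
      = lookWalk f (L.drop k) st := by
    intro n
    induction n with
    | zero =>
      intro k st hk
      have hk' : L.length ≤ k := by omega
      rw [PySem.List.pyRange_one_eq_nil (by exact_mod_cast hk'), List.drop_eq_nil_of_le hk']
      rfl
    | succ n ih =>
      intro k st hk
      by_cases hlt : k < L.length
      · rw [PySem.List.pyRange_one_cons (by exact_mod_cast hlt), List.foldl_cons,
          List.drop_eq_getElem_cons hlt]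
        simp only [lookWalk]
        have e1 : PySem.List.pyGetD L (k : Int) 0 = L[k] := by
          rw [PySem.List.pyGetD_natCast]; exact List.getD_eq_getElem L 0 hlt
        have ec : ((k : Int) + 1) = ((k + 1 : Nat) : Int) := by push_cast; ring
        have e2 : PySem.List.pyGetD L ((k : Int) + 1) 0 = (L.drop (k + 1)).headD 0 := by
          rw [ec, PySem.List.pyGetD_natCast, headD_drop]
        rw [e1, e2, ec]
        exact ih (k + 1) _ (by omega)
      · have hk' : L.length ≤ k := by omega
        rw [PySem.List.pyRange_one_eq_nil (by exact_mod_cast hk'), List.drop_eq_nil_of_le hk']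
        rfl
  intro k st
  exact H L.length k st (by omega)

theorem foldl_max_comm (l : List Int) : ∀ (a b : Int), l.foldl max (max a b) = max a (l.foldl max b) := by
  induction l with
  | nil => intro a b; rfl
  | cons x t ih =>
    intro a b
    simp only [List.foldl_cons, max_assoc, ih]

theorem maxA_append_singleton (L : List Int) (y : Int) : maxA (L ++ [y]) = max (maxA L) y := by
  simp [maxA, List.foldl_append]

theorem maxA_nonneg (L : List Int) : 0 ≤ maxA L := by
  exact (PySem.List.le_foldl_max L 0).1

theorem maxgetD_eq (L : List Int) :
    (PySem.List.max? (L ++ [0]) (fun y => y)).getD 0 = maxA L := by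
  cases L with
  | nil => rfl
  | cons a t =>
    rw [List.cons_append, PySem.List.max?_id_cons, Option.getD_some, List.foldl_append]
    show max (t.foldl max a) 0 = maxA (a :: t)
    have h := foldl_max_comm t 0 a
    simp only [maxA, List.foldl_cons]
    rw [h]
    omega

theorem scanF_zero (st : Int × List Int) (b : Int) : scanF st 0 b = st := by
  simp [scanF]

theorem scanF_one_one (a : Int) (cl : List Int) (b : Int) (hb : b = 1) :
    scanF (a, cl) 1 b = ((if a = 0 then a + 1 else a) + 1, cl) := by
  subst hb; simp [scanF]

theorem scanF_one_other (a : Int) (cl : List Int) (b : Int) (hb : b ≠ 1) :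
    scanF (a, cl) 1 b = (0, cl ++ [if a = 0 then a + 1 else a]) := by
  simp [scanF, hb]

theorem scan_invariant (l : List Int) :
    ∀ (cl : List Int) (c cA r : Int),
      (∀ x ∈ l, x = 0 ∨ x = 1) → 0 ≤ c → r = max (maxA cl) c →
      ((c = 0 ∧ cA = 0) ∨ (0 < c ∧ cA = c + 1 ∧ l.headD 0 = 1) ∨
        (0 < c ∧ cA = 0 ∧ l.headD 0 ≠ 1 ∧ c ≤ maxA cl)) →
      maxA ((lookWalk scanF (l ++ [0]) (cA, cl)).2) = streamRun l r c := by
  induction l with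
  | nil =>
    intro cl c cA r h01 hc hr H
    have : maxA ((lookWalk scanF ([] ++ [0] : List Int) (cA, cl)).2) = maxA cl := by
      simp [lookWalk, scanF]
    rw [this]
    show maxA cl = r
    have hnn := maxA_nonneg cl
    rcases H with ⟨h1, _⟩ | ⟨_, _, h3⟩ | ⟨h1, _, _, h4⟩
    · omega
    · norm_num at h3
    · omega
  | cons x xs ih =>
    intro cl c cA r h01 hc hr H
    have hxs01 : ∀ y ∈ xs, y = 0 ∨ y = 1 := fun y hy => h01 y (by simp [hy])
    rcases h01 x (by simp) with hx | hx
    · subst hx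
      have hA0 : cA = 0 := by
        rcases H with ⟨_, h2⟩ | ⟨_, _, h3⟩ | ⟨_, h2, _, _⟩ <;> first | exact h2 | norm_num at h3
      subst hA0
      simp only [List.cons_append, lookWalk]
      rw [scanF_zero]
      rw [show streamRun (0 :: xs) r c = streamRun xs r 0 from by simp [streamRun]]
      refine ih cl 0 0 r hxs01 le_rfl ?_ (Or.inl ⟨rfl, rfl⟩)
      have hnn := maxA_nonneg cl
      rcases H with ⟨h1, _⟩ | ⟨_, _, h3⟩ | ⟨h1, _, _, h4⟩
      · omega
      · norm_num at h3
      · omega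
    · subst hx
      have hcnt : (if cA = 0 then cA + 1 else cA) = c + 1 := by
        rcases H with ⟨h1, h2⟩ | ⟨h1, h2, _⟩ | ⟨_, _, h3, _⟩
        · subst h1; subst h2; norm_num
        · rw [if_neg (by omega)]; exact h2
        · norm_num at h3
      simp only [List.cons_append, lookWalk]
      rw [show streamRun (1 :: xs) r c = streamRun xs (if c + 1 > r then c + 1 else r) (c + 1) from by
        simp [streamRun]]
      by_cases hd1 : (xs ++ [0]).headD 0 = 1
      · have hhead : xs.headD 0 = 1 := by
          cases xs with
          | nil => norm_num at hd1
          | cons y ys => simpa using hd1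
        rw [scanF_one_one cA cl _ hd1, hcnt]
        refine ih cl (c + 1) (c + 1 + 1) _ hxs01 (by omega) ?_ (Or.inr (Or.inl ⟨by omega, rfl, hhead⟩))
        omega
      · have hhead : xs.headD 0 ≠ 1 := by
          cases xs with
          | nil => norm_num
          | cons y ys => simpa using hd1
        rw [scanF_one_other cA cl _ hd1, hcnt]
        have hm := maxA_append_singleton cl (c + 1)
        refine ih (cl ++ [c + 1]) (c + 1) 0 _ hxs01 (by omega) (by omega)
          (Or.inr (Or.inr ⟨by omega, rfl, hhead, by omega⟩))

theorem foldl_lookahead_zero {σ : Type} (f : σ → Int → Int → σ) (L : List Int) (st : σ) :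
    (PySem.List.pyRange 0 (L.length : Int) 1).foldl
      (fun st j => f st (PySem.List.pyGetD L j 0) (PySem.List.pyGetD L (j + 1) 0)) st
    = lookWalk f L st := by
  have := foldl_lookahead f L 0 st
  simpa using this

-- cheatValue as a map over the index range
theorem cheatValue_map (answer_sheet s1 s2 : List Int) :
    cheatValue answer_sheet s1 s2
    = (PySem.List.pyRange 0 (answer_sheet.length : Int) 1).map
        (fun i => if cheatB answer_sheet s1 s2 i = true then (1 : Int) else 0) := by
  unfold cheatValue
  have hfun : (fun (cheatList : List Int) i =>
      if PySem.List.pyGetD answer_sheet i 0 ≠ PySem.List.pyGetD s1 i 0 ∧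
         PySem.List.pyGetD s1 i 0 = PySem.List.pyGetD s2 i 0 then
        cheatList ++ [1] else cheatList ++ [0])
      = (fun (cheatList : List Int) (i : Int) =>
        cheatList ++ [if cheatB answer_sheet s1 s2 i = true then (1 : Int) else 0]) := by
    funext acc i
    unfold cheatB
    by_cases h1 : PySem.List.pyGetD answer_sheet i 0 ≠ PySem.List.pyGetD s1 i 0 <;>
      by_cases h2 : PySem.List.pyGetD s1 i 0 = PySem.List.pyGetD s2 i 0 <;>
      simp [h1, h2] <;> split_ifs <;> simp_all
  rw [hfun, PySem.List.foldl_append_singleton_eq_map, List.nil_append]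

theorem cheat01 (answer_sheet s1 s2 : List Int) :
    ∀ x ∈ cheatValue answer_sheet s1 s2, x = 0 ∨ x = 1 := by
  rw [cheatValue_map]
  intro x hx
  rcases List.mem_map.1 hx with ⟨i, _, rfl⟩
  split_ifs <;> simp

-- A's per-pair score spelled out (definitional)
theorem pairScoreA_raw (answer_sheet s1 s2 : List Int) :
    pairScoreA answer_sheet s1 s2
    = (cheatValue answer_sheet s1 s2).foldl (fun same j => same + j) 0
      + ((PySem.List.max? (((PySem.List.pyRange 0 (((cheatValue answer_sheet s1 s2 ++ [0]).length : Nat) : Int) 1).foldl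
            (fun st j => scanF st (PySem.List.pyGetD (cheatValue answer_sheet s1 s2 ++ [0]) j 0)
              (PySem.List.pyGetD (cheatValue answer_sheet s1 s2 ++ [0]) (j + 1) 0))
            (0, ([] : List Int))).2 ++ [0]) (fun y => y)).getD 0) ^ 2 := rfl

-- A's per-pair score in closed form: sum of the 0/1 list plus (longest run)²
theorem pairScoreA_closed (answer_sheet s1 s2 : List Int) :
    pairScoreA answer_sheet s1 s2
    = (cheatValue answer_sheet s1 s2).sum
      + (streamRun (cheatValue answer_sheet s1 s2) 0 0) ^ 2 := by
  rw [pairScoreA_raw, foldl_lookahead_zero, maxgetD_eq,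
    scan_invariant (cheatValue answer_sheet s1 s2) [] 0 0 0
      (cheat01 answer_sheet s1 s2) le_rfl (by simp [maxA]) (Or.inl ⟨rfl, rfl⟩)]
  have hsum : (cheatValue answer_sheet s1 s2).foldl (fun same j => same + j) 0
      = (cheatValue answer_sheet s1 s2).sum := by
    simpa [List.map_id] using
      PySem.List.foldl_add (fun x => x) (l := cheatValue answer_sheet s1 s2) (a := 0)
  rw [hsum]

-- ----- B side: the dict, its items, its lookups -----

theorem wrongDict_items (answer_sheet s : List Int) :
    (wrongDict answer_sheet s).items
    = ((PySem.List.pyRange 0 (answer_sheet.length : Int) 1).filter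
        (fun i => decide (PySem.List.pyGetD s i 0 ≠ PySem.List.pyGetD answer_sheet i 0))).map
        (fun i => (i, PySem.List.pyGetD s i 0)) := by
  unfold wrongDict
  have hf : (fun (d : PySem.Dict Int Int) (i : Int) =>
      if PySem.List.pyGetD s i 0 ≠ PySem.List.pyGetD answer_sheet i 0
      then d.insert i (PySem.List.pyGetD s i 0) else d)
      = (fun (d : PySem.Dict Int Int) (i : Int) =>
        if decide (PySem.List.pyGetD s i 0 ≠ PySem.List.pyGetD answer_sheet i 0) = true
        then d.insert i (PySem.List.pyGetD s i 0) else d) := by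
    funext d i
    by_cases h : PySem.List.pyGetD s i 0 ≠ PySem.List.pyGetD answer_sheet i 0 <;> simp [h]
  rw [hf, ← List.foldl_filter]
  have hfresh : ∀ a ∈ (PySem.List.pyRange 0 (answer_sheet.length : Int) 1).filter
      (fun i => decide (PySem.List.pyGetD s i 0 ≠ PySem.List.pyGetD answer_sheet i 0)),
      (PySem.Dict.empty : PySem.Dict Int Int).contains ((fun i => i) a) = false :=
    fun a _ => PySem.Dict.contains_empty a
  have hnd : (((PySem.List.pyRange 0 (answer_sheet.length : Int) 1).filter
      (fun i => decide (PySem.List.pyGetD s i 0 ≠ PySem.List.pyGetD answer_sheet i 0))).map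
      (fun i => i)).Nodup := by
    simpa using (PySem.List.nodup_pyRange_one 0 (answer_sheet.length : Int)).filter _
  have h := PySem.Dict.items_foldl_insert_fresh
    ((PySem.List.pyRange 0 (answer_sheet.length : Int) 1).filter
      (fun i => decide (PySem.List.pyGetD s i 0 ≠ PySem.List.pyGetD answer_sheet i 0)))
    (fun i => i) (fun i => PySem.List.pyGetD s i 0) PySem.Dict.empty hfresh hnd
  simpa using h

theorem wrongDict_keys_nodup (answer_sheet s : List Int) :
    (wrongDict answer_sheet s).keys.Nodup := by
  have h : (wrongDict answer_sheet s).keys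
      = ((PySem.List.pyRange 0 (answer_sheet.length : Int) 1).filter
          (fun i => decide (PySem.List.pyGetD s i 0 ≠ PySem.List.pyGetD answer_sheet i 0))) := by
    show (wrongDict answer_sheet s).items.map (·.1) = _
    rw [wrongDict_items, List.map_map]
    exact List.map_id' _
  rw [h]
  exact (PySem.List.nodup_pyRange_one 0 (answer_sheet.length : Int)).filter _

theorem wrongDict_get?_iff (answer_sheet s : List Int) (i w : Int) :
    (wrongDict answer_sheet s).get? i = some w ↔
      (0 ≤ i ∧ i < (answer_sheet.length : Int) ∧
       PySem.List.pyGetD s i 0 ≠ PySem.List.pyGetD answer_sheet i 0 ∧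
       w = PySem.List.pyGetD s i 0) := by
  constructor
  · intro h
    have hm := PySem.Dict.mem_items_of_get?_eq_some _ h
    rw [wrongDict_items] at hm
    rcases List.mem_map.1 hm with ⟨j, hj, hji⟩
    rcases List.mem_filter.1 hj with ⟨hjr, hjc⟩
    have h1 : j = i := congrArg Prod.fst hji
    subst h1
    have h2 : PySem.List.pyGetD s j 0 = w := congrArg Prod.snd hji
    rcases (PySem.List.mem_pyRange_one).1 hjr with ⟨hge, hlt⟩
    exact ⟨hge, hlt, by simpa using hjc, h2.symm⟩
  · rintro ⟨hge, hlt, hne, rfl⟩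
    refine PySem.Dict.get?_of_mem_items _ ?_ (wrongDict_keys_nodup answer_sheet s)
    rw [wrongDict_items]
    exact List.mem_map.2 ⟨i, List.mem_filter.2
      ⟨(PySem.List.mem_pyRange_one).2 ⟨hge, hlt⟩, by simpa using hne⟩, rfl⟩

-- the position list B builds from the two dicts is the filtered index range
theorem posList_eq (answer_sheet s1 s2 : List Int) :
    posOf (wrongDict answer_sheet s1) (wrongDict answer_sheet s2)
    = (PySem.List.pyRange 0 (answer_sheet.length : Int) 1).filter
        (cheatB answer_sheet s1 s2) := by
  unfold posOf
  rw [PySem.List.foldl_append_if, List.nil_append, wrongDict_items, List.filter_map,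
    List.map_map]
  have hmap : ((fun (p : Int × Int) => p.1) ∘ (fun i => (i, PySem.List.pyGetD s1 i 0)))
      = fun (i : Int) => i := rfl
  rw [hmap, List.filter_filter]
  rw [List.map_id' _]
  apply List.filter_congr
  intro i hi
  rcases (PySem.List.mem_pyRange_one).1 hi with ⟨hge, hlt⟩
  show ((PySem.Dict.get? (wrongDict answer_sheet s2) i == some (PySem.List.pyGetD s1 i 0)) &&
      decide (PySem.List.pyGetD s1 i 0 ≠ PySem.List.pyGetD answer_sheet i 0))
    = cheatB answer_sheet s1 s2 i
  unfold cheatB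
  by_cases h1 : PySem.List.pyGetD answer_sheet i 0 = PySem.List.pyGetD s1 i 0
  · simp [h1]
  · by_cases h2 : PySem.List.pyGetD s1 i 0 = PySem.List.pyGetD s2 i 0
    · have hget : (wrongDict answer_sheet s2).get? i = some (PySem.List.pyGetD s1 i 0) := by
        rw [wrongDict_get?_iff]
        exact ⟨hge, hlt, by rw [← h2]; exact fun h => h1 (Eq.symm h), h2⟩
      simp [hget, h2, eq_comm]
    · have hget : (wrongDict answer_sheet s2).get? i ≠ some (PySem.List.pyGetD s1 i 0) := by
        intro h
        rcases (wrongDict_get?_iff answer_sheet s2 i _).1 h with ⟨_, _, _, heq⟩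
        exact h2 heq
      simp [beq_eq_false_iff_ne.2 hget, h1, h2]

-- the filtered index range is posIdx of the 0/1 list
theorem posIdx_map_pyRange (p : Int → Bool) :
    ∀ (fuel : Nat) (k m : Int), (m - k).toNat ≤ fuel →
      posIdx ((PySem.List.pyRange k m 1).map (fun i => if p i = true then (1 : Int) else 0)) k
      = (PySem.List.pyRange k m 1).filter p := by
  intro fuel
  induction fuel with
  | zero =>
    intro k m hk
    rw [PySem.List.pyRange_one_eq_nil (by omega)]
    rfl
  | succ n ih =>
    intro k m hk
    by_cases hlt : k < m
    · rw [PySem.List.pyRange_one_cons hlt, List.map_cons, List.filter_cons]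
      cases hp : p k with
      | true => simp [posIdx, ih (k + 1) m (by omega)]
      | false => simp [posIdx, ih (k + 1) m (by omega)]
    · rw [PySem.List.pyRange_one_eq_nil (by omega)]
      rfl

-- B's streaming run loop over the positions of the 1-entries computes streamRun
theorem run_eq (bits : List Int) :
    ∀ (k r c cur : Int) (prev : Option Int),
      (∀ x ∈ bits, x = 0 ∨ x = 1) → 0 ≤ c →
      (∀ p, prev = some p → p < k) →
      (c = 0 → prev ≠ some (k - 1)) →
      (0 < c → prev = some (k - 1) ∧ cur = c) →
      ((posIdx bits k).foldl runStep (r, cur, prev)).1 = streamRun bits r c := by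
  induction bits with
  | nil => intro k r c cur prev h01 hc hb h0 h1; rfl
  | cons x xs ih =>
    intro k r c cur prev h01 hc hb h0 h1
    have hxs01 : ∀ y ∈ xs, y = 0 ∨ y = 1 := fun y hy => h01 y (by simp [hy])
    rcases h01 x (by simp) with hx | hx
    · subst hx
      rw [show posIdx (0 :: xs) k = posIdx xs (k + 1) from by simp [posIdx],
        show streamRun (0 :: xs) r c = streamRun xs r 0 from by simp [streamRun]]
      refine ih (k + 1) r 0 cur prev hxs01 le_rfl
        (fun p hp => by have := hb p hp; omega) ?_ (by omega)
      intro _ hps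
      have := hb _ hps
      omega
    · subst hx
      rw [show posIdx (1 :: xs) k = k :: posIdx xs (k + 1) from by simp [posIdx],
        show streamRun (1 :: xs) r c = streamRun xs (if c + 1 > r then c + 1 else r) (c + 1) from by
          simp [streamRun],
        List.foldl_cons]
      have hcur : runStep (r, cur, prev) k
          = ((if c + 1 > r then c + 1 else r), c + 1, some k) := by
        unfold runStep
        by_cases hc0 : c = 0
        · subst hc0
          have hne : (prev == some (k - 1)) = false := by
            cases prev with
            | none => rfl
            | some p =>
              have := h0 rfl
              rw [beq_eq_false_iff_ne]
              simpa using fun h => this (by rw [h])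
          simp [hne]
        · rcases h1 (by omega) with ⟨hp, hcu⟩
          subst hp
          simp [hcu]
      rw [hcur]
      exact ih (k + 1) _ (c + 1) (c + 1) (some k) hxs01 (by omega)
        (fun p hp => by injection hp with h; omega)
        (by omega) (fun _ => ⟨by norm_num, rfl⟩)

-- number of 1-positions = sum of a 0/1 list
theorem posIdx_length (l : List Int) :
    ∀ k, (∀ x ∈ l, x = 0 ∨ x = 1) → ((posIdx l k).length : Int) = l.sum := by
  induction l with
  | nil => intro k _; rfl
  | cons x xs ih =>
    intro k h01
    have hxs : ∀ y ∈ xs, y = 0 ∨ y = 1 := fun y hy => h01 y (by simp [hy])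
    rcases h01 x (by simp) with hx | hx <;> subst hx
    · rw [show posIdx (0 :: xs) k = posIdx xs (k + 1) from by simp [posIdx]]
      rw [ih (k + 1) hxs]
      simp
    · rw [show posIdx (1 :: xs) k = k :: posIdx xs (k + 1) from by simp [posIdx]]
      have := ih (k + 1) hxs
      simp only [List.length_cons, List.sum_cons]
      push_cast
      omega

-- per-pair equality of the two scores
theorem pairScore_eq (answer_sheet s1 s2 : List Int) :
    pairScoreA answer_sheet s1 s2
    = pairScoreB (wrongDict answer_sheet s1) (wrongDict answer_sheet s2) := by
  unfold pairScoreB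
  rw [posList_eq answer_sheet s1 s2,
    ← posIdx_map_pyRange (cheatB answer_sheet s1 s2)
      ((answer_sheet.length : Int) - 0).toNat 0 (answer_sheet.length : Int) le_rfl,
    ← cheatValue_map,
    run_eq (cheatValue answer_sheet s1 s2) 0 0 0 0 none
      (cheat01 answer_sheet s1 s2) le_rfl (by intro p hp; cases hp) (by intro _ h; cases h)
      (by omega),
    posIdx_length (cheatValue answer_sheet s1 s2) 0 (cheat01 answer_sheet s1 s2),
    pairScoreA_closed]
  ring

theorem comb2 {α : Type} (xs : List α) :
    PySem.List.combinations xs 2 = pairsBy (fun a b => [a, b]) xs := by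
  induction xs with
  | nil => rfl
  | cons x t ih =>
    rw [PySem.List.combinations_cons_succ, PySem.List.combinations_one, ih]
    simp [pairsBy, List.map_map]

theorem map_pairsBy {α β γ : Type} (g : β → γ) (F : α → α → β) (xs : List α) :
    (pairsBy F xs).map g = pairsBy (fun a b => g (F a b)) xs := by
  induction xs with
  | nil => rfl
  | cons x t ih => simp [pairsBy, ih, List.map_map]

theorem pairsBy_congr {α β : Type} (F G : α → α → β) (xs : List α)
    (h : ∀ a ∈ xs, ∀ b ∈ xs, F a b = G a b) : pairsBy F xs = pairsBy G xs := by
  induction xs with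
  | nil => rfl
  | cons x t ih =>
    simp only [pairsBy]
    rw [List.map_congr_left (fun b hb => h x (by simp) b (by simp [hb])),
      ih (fun a ha b hb => h a (by simp [ha]) b (by simp [hb]))]

-- A's whole result as a max over index pairs
theorem solutionA_eq (answer_sheet : List Int) (sheets : List (List Int)) :
    solution answer_sheet sheets
    = (PySem.List.max? (pairsBy (fun a b => pairScoreA answer_sheet
          (PySem.List.pyGetD sheets a ([] : List Int))
          (PySem.List.pyGetD sheets b ([] : List Int)))
        (PySem.List.pyRange 0 (sheets.length : Int) 1)) (fun y => y)).getD 0 := by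
  simp only [solution]
  rw [PySem.List.foldl_append_singleton_eq_map, List.nil_append, comb2, map_pairsBy]
  rfl

-- B's nested index loops produce exactly the index pairs
theorem flatMap_pairsBy (m : Int) (F : Int → Int → Int) :
    ∀ (fuel : Nat) (k : Int), (m - k).toNat ≤ fuel →
      (PySem.List.pyRange k m 1).flatMap (fun j => (PySem.List.pyRange (j + 1) m 1).map (F j))
      = pairsBy F (PySem.List.pyRange k m 1) := by
  intro fuel
  induction fuel with
  | zero =>
    intro k hk
    rw [PySem.List.pyRange_one_eq_nil (by omega)]
    rfl
  | succ n ih =>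
    intro k hk
    by_cases hlt : k < m
    · rw [PySem.List.pyRange_one_cons hlt, List.flatMap_cons]
      show _ = pairsBy F (k :: PySem.List.pyRange (k + 1) m 1)
      rw [show pairsBy F (k :: PySem.List.pyRange (k + 1) m 1)
          = (PySem.List.pyRange (k + 1) m 1).map (F k) ++ pairsBy F (PySem.List.pyRange (k + 1) m 1)
          from rfl]
      rw [ih (k + 1) (by omega)]
    · rw [PySem.List.pyRange_one_eq_nil (by omega)]
      rfl

-- B's whole result as a max over index pairs
theorem solutionB_eq (answer_sheet : List Int) (sheets : List (List Int)) :
    solution_alt answer_sheet sheets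
    = (PySem.List.max? (pairsBy (fun j k => pairScoreB
          (PySem.List.pyGetD (sheets.map (wrongDict answer_sheet)) j PySem.Dict.empty)
          (PySem.List.pyGetD (sheets.map (wrongDict answer_sheet)) k PySem.Dict.empty))
        (PySem.List.pyRange 0 (sheets.length : Int) 1)) (fun y => y)).getD 0 := by
  simp only [solution_alt]
  simp only [PySem.List.foldl_append_singleton_eq_map, PySem.List.foldl_append_eq_flatMap,
    List.nil_append]
  rw [flatMap_pairsBy (sheets.length : Int) _ ((sheets.length : Int) - 0).toNat 0 le_rfl]
  rfl

-- ===== VERDICT (by name: the statement is the Claim_ definition above) =====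
theorem solution_spec : Claim_equal_solution := by
  intro answer_sheet sheets _ _
  unfold Spec_solution
  rw [solutionA_eq, solutionB_eq]
  have hXY : pairsBy (fun a b => pairScoreA answer_sheet
        (PySem.List.pyGetD sheets a ([] : List Int))
        (PySem.List.pyGetD sheets b ([] : List Int)))
      (PySem.List.pyRange 0 (sheets.length : Int) 1)
    = pairsBy (fun j k => pairScoreB
        (PySem.List.pyGetD (sheets.map (wrongDict answer_sheet)) j PySem.Dict.empty)
        (PySem.List.pyGetD (sheets.map (wrongDict answer_sheet)) k PySem.Dict.empty))
      (PySem.List.pyRange 0 (sheets.length : Int) 1) := by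
    apply pairsBy_congr
    intro a ha b hb
    rcases (PySem.List.mem_pyRange_one).1 ha with ⟨ha0, ham⟩
    rcases (PySem.List.mem_pyRange_one).1 hb with ⟨hb0, hbm⟩
    have hal : a.toNat < sheets.length := by omega
    have hbl : b.toNat < sheets.length := by omega
    have ea : PySem.List.pyGetD (sheets.map (wrongDict answer_sheet)) a PySem.Dict.empty
        = wrongDict answer_sheet (PySem.List.pyGetD sheets a ([] : List Int)) := by
      rw [PySem.List.pyGetD_eq_getElem _ PySem.Dict.empty ha0 (by simpa using ham),
        PySem.List.pyGetD_eq_getElem _ ([] : List Int) ha0 (by exact_mod_cast ham)]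
      simp
    have eb : PySem.List.pyGetD (sheets.map (wrongDict answer_sheet)) b PySem.Dict.empty
        = wrongDict answer_sheet (PySem.List.pyGetD sheets b ([] : List Int)) := by
      rw [PySem.List.pyGetD_eq_getElem _ PySem.Dict.empty hb0 (by simpa using hbm),
        PySem.List.pyGetD_eq_getElem _ ([] : List Int) hb0 (by exact_mod_cast hbm)]
      simp
    rw [ea, eb, pairScore_eq]
  rw [hXY]
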